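-- pv_equiv track=rewrite | github.com/SergeyLipatnikov/AlgorythmPython | Odometer.py | odometer
-- ===== SOURCE A (Python) =====
-- def odometer ( oksana ):
--
--     distance = 0
--
--     for i in range(len(oksana)):
--
--         if (i % 2 == 0):
--
--             speed = oksana[i]
--
--         else:
--
--             if (i == 1):
--
--                 time = oksana[i]
--
--             else:
--
--                 time = oksana[i] - oksana[i-2]
--
--             distance += speed * time
--
--     return distance
-- ===== SOURCE B (Python) =====
-- def odometer(oksana):
--     # Summation by parts (Abel summation): instead of accumulating speed * (time delta)
--     # with carried state, compute the stateless closed-form sum of time * (speed - next speed):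
--     # sum_k s_k*(t_k - t_{k-1}) == sum_k t_k*(s_k - s_{k+1})  with t_{-1} = 0 and s_m = 0.
--     m = len(oksana) // 2
--     return sum(oksana[2*k + 1] * (oksana[2*k] - (oksana[2*k + 2] if k + 1 < m else 0))
--                for k in range(m))
-- ===== Notes on version B (the rewrite author's own statement) =====
-- stated objective: simpler
-- what changed: Replaces A's stateful index loop (parity branch, i==1 special case, carried speed and time deltas) by a stateless closed-form sum via summation by parts: distance = sum of time_k * (speed_k - speed_{k+1}), a single comprehension with no accumulator state.
import Mathlib
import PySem

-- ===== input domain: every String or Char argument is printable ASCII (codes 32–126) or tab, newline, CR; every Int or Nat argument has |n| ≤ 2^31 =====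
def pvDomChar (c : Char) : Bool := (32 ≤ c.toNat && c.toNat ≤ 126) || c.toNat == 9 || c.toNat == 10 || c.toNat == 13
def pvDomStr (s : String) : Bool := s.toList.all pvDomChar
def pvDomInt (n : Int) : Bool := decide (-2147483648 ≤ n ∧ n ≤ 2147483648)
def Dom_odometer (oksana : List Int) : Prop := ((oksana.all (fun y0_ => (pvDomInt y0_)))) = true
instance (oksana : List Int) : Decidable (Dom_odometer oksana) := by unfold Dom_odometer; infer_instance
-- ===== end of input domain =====

-- B replaces A's stateful index loop (parity branch, i==1 case, carried deltas) by a stateless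
-- summation-by-parts closed-form sum (time_k * (speed_k - speed_{k+1})); objective: simpler.


-- ===== PORT A =====
-- the for loop over range(len(oksana)) as index recursion over the same state (distance, speed)
def odometerGo (xs : List Int) (i : Nat) (dist spd : Int) : Int :=
  if i < xs.length then
    if i % 2 == 0 then
      odometerGo xs (i + 1) dist (PySem.List.pyGetD xs (i : Int) 0)
    else
      let time : Int :=
        if i == 1 then PySem.List.pyGetD xs (i : Int) 0
        else PySem.List.pyGetD xs (i : Int) 0 - PySem.List.pyGetD xs ((i : Int) - 2) 0
      odometerGo xs (i + 1) (dist + spd * time) spd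
  else dist
termination_by xs.length - i

def odometer (oksana : List Int) : Int := odometerGo oksana 0 0 0

-- ===== PORT B =====
-- Source B: m = len(oksana) // 2; sum(oksana[2k+1] * (oksana[2k] - (oksana[2k+2] if k+1 < m else 0)) for k in range(m))
def odometer_alt (oksana : List Int) : Int :=
  let m : Int := PySem.Int.floordiv (oksana.length : Int) 2
  (((PySem.List.pyRange 0 m 1).map (fun k =>
      PySem.List.pyGetD oksana (2 * k + 1) 0 *
        (PySem.List.pyGetD oksana (2 * k) 0 -
          (if k + 1 < m then PySem.List.pyGetD oksana (2 * k + 2) 0 else 0)))).sum)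

-- ===== PRECONDITION & SPEC =====
def Spec_odometer (oksana : List Int) (out : Int) : Prop := out = odometer_alt oksana
instance (oksana : List Int) (out : Int) : Decidable (Spec_odometer oksana out) := by unfold Spec_odometer; infer_instance

-- ===== CLAIM (what is proved, stated in full; the proofs are below) =====
def Claim_equal_odometer : Prop := ∀ (oksana : List Int), Dom_odometer oksana → Spec_odometer oksana (odometer oksana)

-- ===== LEMMAS AND PROOFS =====

-- two-at-a-time list induction
theorem pairInd {α : Type} {P : List α → Prop} (h0 : P []) (h1 : ∀ s, P [s])
    (h2 : ∀ s t r, P r → P (s :: t :: r)) : ∀ l, P l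
  | [] => h0
  | [s] => h1 s
  | s :: t :: r => h2 s t r (pairInd h0 h1 h2 r)

-- common meeting point: first speed of a pair list, and the pairwise recursive distance
def hd2 : List Int → Int
  | s :: _ :: _ => s
  | _ => 0

def bSpec : List Int → Int
  | s :: t :: r => t * (s - hd2 r) + bSpec r
  | _ => 0

theorem hd2_eq (r : List Int) : (if 2 ≤ r.length then r.getD 0 0 else 0) = hd2 r := by
  match r with
  | [] => simp [hd2]
  | [x] => simp [hd2]
  | x :: y :: r' => simp [hd2]

-- ---- A side: A's index loop equals a pair-consuming recursion, which equals bSpec ----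
def pairGo : List Int → Int → Int → Int
  | speed :: t :: rest, prev, dist => pairGo rest t (dist + speed * (t - prev))
  | _, _, dist => dist

theorem getD_append_self (a b : List Int) (j : Nat) :
    (a ++ b).getD (a.length + j) 0 = b.getD j 0 := by
  simp [List.getD, List.getElem?_append_right]

theorem key (b : List Int) : ∀ (a : List Int) (dist spd prev : Int),
    a.length % 2 = 0 →
    (a = [] → prev = 0) → (∀ h : a ≠ [], prev = a.getLast h) →
    odometerGo (a ++ b) a.length dist spd = pairGo b prev dist := by
  induction b using pairInd with
  | h0 =>
    intro a dist spd prev _ _ _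
    rw [odometerGo]
    simp [pairGo]
  | h1 s =>
    intro a dist spd prev hpar _ _
    rw [odometerGo]
    simp only [List.length_append, List.length_cons, List.length_nil]
    rw [if_pos (by omega), if_pos (by simpa using hpar)]
    rw [odometerGo]
    simp [pairGo]
  | h2 s t r ih =>
    intro a dist spd prev hpar hnil hlast
    rw [odometerGo]
    have hlen : a.length < (a ++ s :: t :: r).length := by simp
    rw [if_pos hlen, if_pos (by simpa using hpar)]
    have hs : PySem.List.pyGetD (a ++ s :: t :: r) (a.length : Int) 0 = s := by
      rw [PySem.List.pyGetD_natCast]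
      simpa using getD_append_self a (s :: t :: r) 0
    rw [hs]
    rw [odometerGo]
    have hlen2 : a.length + 1 < (a ++ s :: t :: r).length := by simp
    rw [if_pos hlen2, if_neg (by simp [Nat.add_mod, hpar])]
    have ht : PySem.List.pyGetD (a ++ s :: t :: r) ((a.length + 1 : Nat) : Int) 0 = t := by
      rw [PySem.List.pyGetD_natCast]
      simpa using getD_append_self a (s :: t :: r) 1
    have hstep : (if (a.length + 1 == 1) = true then
          PySem.List.pyGetD (a ++ s :: t :: r) ((a.length + 1 : Nat) : Int) 0
        else PySem.List.pyGetD (a ++ s :: t :: r) ((a.length + 1 : Nat) : Int) 0 -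
          PySem.List.pyGetD (a ++ s :: t :: r) (((a.length + 1 : Nat) : Int) - 2) 0) =
        t - prev := by
      by_cases ha : a = []
      · subst ha
        rw [if_pos (by simp), hnil rfl]
        simpa using ht
      · have h2 : 2 ≤ a.length := by
          have : a.length ≠ 0 := by simpa [List.length_eq_zero_iff] using ha
          omega
        rw [if_neg (by simp; omega), ht]
        have hprev : PySem.List.pyGetD (a ++ s :: t :: r) (((a.length + 1 : Nat) : Int) - 2) 0 = prev := by
          have : (((a.length + 1 : Nat) : Int) - 2) = ((a.length - 1 : Nat) : Int) := by
            push_cast [Nat.cast_sub (by omega : 1 ≤ a.length)]; ring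
          rw [this, PySem.List.pyGetD_natCast]
          rw [List.getD, List.getElem?_append_left (by omega)]
          rw [hlast ha, List.getLast_eq_getElem]
          simp [List.getElem?_eq_getElem (by omega : a.length - 1 < a.length)]
        rw [hprev]
    simp only [hstep]
    have hassoc : a ++ s :: t :: r = (a ++ [s, t]) ++ r := by simp
    have hlen3 : a.length + 1 + 1 = (a ++ [s, t]).length := by simp
    rw [hassoc, hlen3]
    rw [ih (a ++ [s, t]) (dist + s * (t - prev)) s t (by simp [hpar])
      (by simp) (by intro _; simp)]
    rfl

-- the pair recursion computed via summation by parts: telescoping bridge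
theorem pairGo_eq_bSpec : ∀ (l : List Int) (prev dist : Int),
    pairGo l prev dist = dist + bSpec l - hd2 l * prev := by
  intro l
  induction l using pairInd with
  | h0 => intro prev dist; simp [pairGo, bSpec, hd2]
  | h1 s => intro prev dist; simp [pairGo, bSpec, hd2]
  | h2 s t r ih =>
    intro prev dist
    rw [pairGo, ih, bSpec, hd2]
    ring

-- ---- B side: the closed-form sum equals bSpec ----
theorem alt_eq_natSum (xs : List Int) : odometer_alt xs =
    ((List.range (xs.length / 2)).map (fun k =>
      xs.getD (2 * k + 1) 0 *
        (xs.getD (2 * k) 0 - (if k + 1 < xs.length / 2 then xs.getD (2 * k + 2) 0 else 0)))).sum := by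
  simp only [odometer_alt]
  have hm : PySem.Int.floordiv ((xs.length : Nat) : Int) ((2 : Nat) : Int)
      = ((xs.length / 2 : Nat) : Int) := PySem.Int.floordiv_natCast xs.length 2
  simp only [show ((2 : Nat) : Int) = (2 : Int) from rfl] at hm
  rw [hm, PySem.List.pyRange_one]
  simp only [Int.sub_zero, Int.toNat_natCast, List.map_map]
  congr 1
  refine List.map_congr_left ?_
  intro k _
  simp only [Function.comp]
  have h1 : (2 * ((0 : Int) + (k : Int)) + 1) = ((2 * k + 1 : Nat) : Int) := by push_cast; ring
  have h2 : (2 * ((0 : Int) + (k : Int))) = ((2 * k : Nat) : Int) := by push_cast; ring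
  have h3 : (2 * ((0 : Int) + (k : Int)) + 2) = ((2 * k + 2 : Nat) : Int) := by push_cast; ring
  rw [h1, h3, h2, PySem.List.pyGetD_natCast, PySem.List.pyGetD_natCast, PySem.List.pyGetD_natCast]
  congr 1
  congr 1
  by_cases hk : k + 1 < xs.length / 2
  · rw [if_pos (by push_cast; omega), if_pos hk]
  · rw [if_neg (by push_cast; omega), if_neg hk]

theorem natSum_eq_bSpec : ∀ (xs : List Int),
    ((List.range (xs.length / 2)).map (fun k =>
      xs.getD (2 * k + 1) 0 *
        (xs.getD (2 * k) 0 - (if k + 1 < xs.length / 2 then xs.getD (2 * k + 2) 0 else 0)))).sum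
    = bSpec xs := by
  intro xs
  induction xs using pairInd with
  | h0 => simp [bSpec]
  | h1 s => simp [bSpec]
  | h2 s t r ih =>
    have hm : (s :: t :: r).length / 2 = r.length / 2 + 1 := by simp; omega
    rw [hm, List.range_succ_eq_map]
    simp only [List.map_cons, List.map_map, List.sum_cons]
    have hhead : (s :: t :: r).getD (2 * 0 + 1) 0 *
        ((s :: t :: r).getD (2 * 0) 0 -
          (if 0 + 1 < r.length / 2 + 1 then (s :: t :: r).getD (2 * 0 + 2) 0 else 0))
        = t * (s - hd2 r) := by
      have hg : (if 0 + 1 < r.length / 2 + 1 then (s :: t :: r).getD 2 0 else 0) = hd2 r := by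
        rw [← hd2_eq r]
        by_cases h : 2 ≤ r.length
        · rw [if_pos (by omega), if_pos h]; simp [List.getD]
        · rw [if_neg (by omega), if_neg h]
      simpa [List.getD] using congrArg (fun x => t * (s - x)) hg
    rw [hhead, bSpec, ← ih]
    congr 1
    congr 1
    refine List.map_congr_left ?_
    intro k _
    simp only [Function.comp, Nat.succ_eq_add_one]
    have e1 : (s :: t :: r).getD (2 * (k + 1) + 1) 0 = r.getD (2 * k + 1) 0 := by
      simp [List.getD, show 2 * (k + 1) + 1 = 2 * k + 1 + 2 by ring]
    have e2 : (s :: t :: r).getD (2 * (k + 1)) 0 = r.getD (2 * k) 0 := by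
      simp [List.getD, show 2 * (k + 1) = 2 * k + 2 by ring]
    have e3 : (s :: t :: r).getD (2 * (k + 1) + 2) 0 = r.getD (2 * k + 2) 0 := by
      simp [List.getD, show 2 * (k + 1) + 2 = 2 * k + 2 + 2 by ring]
    rw [e1, e2, e3]
    congr 2
    by_cases hk : k + 1 < r.length / 2
    · rw [if_pos (by omega), if_pos hk]
    · rw [if_neg (by omega), if_neg hk]

-- ===== VERDICT (by name: the statement is the Claim_ definition above) =====
theorem odometer_spec : Claim_equal_odometer := by
  intro oksana _
  unfold Spec_odometer odometer
  have hA := key oksana [] 0 0 0 (by simp) (fun _ => rfl) (by simp)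
  simp only [List.nil_append, List.length_nil] at hA
  rw [hA, pairGo_eq_bSpec, alt_eq_natSum, natSum_eq_bSpec]
  ring
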